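-- pv_equiv track=rewrite | github.com/Huulab/PADD-seq | scripts/readProfile.py | count_in_bin
-- ===== SOURCE A (Python) =====
-- def count_in_bin(x,y):
-- 	if len(y) % x:
-- 		exit("please input a valid binSize value.\n\trefers to --help")
-- 	else:
-- 		bs = []
-- 		bl = len(y) // x
-- 		for i in range(bl):
-- 			tmplist = y[i*x:(i+1)*x]
-- 			sumup = sum(tmplist)
-- 			#sumup /= x
-- 			bs.append(sumup)
-- 		return bs
-- ===== SOURCE B (Python) =====
-- def count_in_bin(x, y):
--     if len(y) % x:
--         exit("please input a valid binSize value.\n\trefers to --help")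
--     if x <= 0:
--         return []
--     bs = []
--     total = 0
--     cnt = 0
--     for v in y:
--         total += v
--         cnt += 1
--         if cnt == x:
--             bs.append(total)
--             total = 0
--             cnt = 0
--     return bs
-- ===== Notes on version B (the rewrite author's own statement) =====
-- stated objective: alternative
-- what changed: Replaces the per-bin slice-and-sum loop over bin indices by a single element-wise pass with a running total and counter that emits a bin sum every x elements (with an explicit empty result for non-positive x, where A's range is empty).
import Mathlib
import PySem

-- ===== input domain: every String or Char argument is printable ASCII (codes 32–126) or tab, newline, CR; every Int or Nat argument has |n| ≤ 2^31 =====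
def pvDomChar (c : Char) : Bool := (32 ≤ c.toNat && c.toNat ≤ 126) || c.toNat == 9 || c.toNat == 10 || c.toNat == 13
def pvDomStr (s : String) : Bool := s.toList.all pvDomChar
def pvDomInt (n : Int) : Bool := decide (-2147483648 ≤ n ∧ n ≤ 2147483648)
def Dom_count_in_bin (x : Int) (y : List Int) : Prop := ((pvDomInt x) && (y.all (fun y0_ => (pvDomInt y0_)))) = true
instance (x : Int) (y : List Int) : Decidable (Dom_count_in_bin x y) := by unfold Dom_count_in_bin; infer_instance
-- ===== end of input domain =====

-- B changes the decomposition: a single element-wise pass with a running total and counter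
-- instead of A's slice-and-sum per bin index (objective: alternative).

-- ===== PORT A =====
-- Port of A's else-branch (the guard's exit/ZeroDivisionError inputs are excluded by Pre_).
def count_in_bin (x : Int) (y : List Int) : List Int :=
  let bl := PySem.Int.floordiv (y.length : Int) x
  (PySem.List.pyRange 0 bl 1).foldl
    (fun bs i => bs ++ [(PySem.List.slice y (some (i * x)) (some ((i + 1) * x))).sum]) []

-- ===== PORT B =====
-- the for-loop of Source B over y with state (total, cnt, bs)
def countAltGo (x : Int) : List Int → Int → Int → List Int → List Int
  | [], _, _, bs => bs
  | v :: rest, total, cnt, bs =>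
    let total' := total + v
    let cnt' := cnt + 1
    if cnt' = x then countAltGo x rest 0 0 (bs ++ [total'])
    else countAltGo x rest total' cnt' bs

def count_in_bin_alt (x : Int) (y : List Int) : List Int :=
  if x ≤ 0 then [] else countAltGo x y 0 0 []

-- ===== PRECONDITION & SPEC =====
-- Exactly the inputs on which A returns: x = 0 raises ZeroDivisionError, and a nonzero
-- remainder len(y) % x takes the exit() branch.
def Pre_count_in_bin (x : Int) (y : List Int) : Prop :=
  x ≠ 0 ∧ PySem.Int.mod (y.length : Int) x = 0
instance (x : Int) (y : List Int) : Decidable (Pre_count_in_bin x y) := by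
  unfold Pre_count_in_bin; infer_instance

def pvWitness_count_in_bin : Int × List Int := (2, [1, 2, 3, 4])

def Spec_count_in_bin (x : Int) (y : List Int) (out : List Int) : Prop := out = count_in_bin_alt x y
instance (x : Int) (y : List Int) (out : List Int) : Decidable (Spec_count_in_bin x y out) := by unfold Spec_count_in_bin; infer_instance

-- ===== CLAIM (what is proved, stated in full; the proofs are below) =====
def Claim_equal_count_in_bin : Prop := ∀ (x : Int) (y : List Int), Dom_count_in_bin x y → Pre_count_in_bin x y → Spec_count_in_bin x y (count_in_bin x y)

-- ===== LEMMAS AND PROOFS =====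

theorem foldl_append_map {α β : Type} (f : α → β) :
    ∀ (l : List α) (acc : List β),
      l.foldl (fun bs i => bs ++ [f i]) acc = acc ++ l.map f := by
  intro l
  induction l with
  | nil => intro acc; simp
  | cons a t ih => intro acc; simp [List.foldl, ih]

-- A's mapped body at a Nat bin index is the sum of the k-th chunk
theorem slice_chunk (y : List Int) (xn k : Nat) (hx : 0 < xn) :
    (PySem.List.slice y (some ((k : Int) * (xn : Int))) (some (((k : Int) + 1) * (xn : Int)))).sum
      = ((y.drop (k * xn)).take xn).sum := by
  have h1 : ((k : Int) * (xn : Int)) = (((k * xn : Nat) : Int)) := by push_cast; ring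
  have h2 : (((k : Int) + 1) * (xn : Int)) = ((((k + 1) * xn : Nat) : Int)) := by push_cast; ring
  rw [h1, h2, PySem.List.slice_natCast]
  have h3 : (k + 1) * xn - k * xn = xn := by
    rw [Nat.succ_mul]; omega
  rw [h3]

-- B's loop finishes one bin after consuming xn-c more elements
theorem countAltGo_bin (xn : Nat) (_hx : 0 < xn) :
    ∀ (u : List Int) (c : Nat) (t : Int) (rest bs : List Int),
      u.length + c = xn → c < xn →
      countAltGo (xn : Int) (u ++ rest) t (c : Int) bs
        = countAltGo (xn : Int) rest 0 0 (bs ++ [t + u.sum]) := by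
  intro u
  induction u with
  | nil => intro c t rest bs hlen hc; simp at hlen; omega
  | cons v u' ih =>
    intro c t rest bs hlen hc
    simp only [List.cons_append, countAltGo]
    simp only [List.length_cons] at hlen
    by_cases hfin : c + 1 = xn
    · have hu' : u' = [] := List.length_eq_zero_iff.mp (by omega : u'.length = 0)
      subst hu'
      have hci : (c : Int) + 1 = (xn : Int) := by omega
      simp [hci, List.sum_cons]
    · have hne : (c : Int) + 1 ≠ (xn : Int) := by omega
      rw [if_neg hne]
      have hcast : ((c + 1 : Nat) : Int) = (c : Int) + 1 := by push_cast; ring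
      rw [← hcast, ih (c + 1) (t + v) rest bs (by omega) (by omega)]
      simp [List.sum_cons]
      ring_nf

-- B's loop computes the chunk sums
theorem countAltGo_chunks (xn : Nat) (hx : 0 < xn) :
    ∀ (m : Nat) (y bs : List Int), y.length = m * xn →
      countAltGo (xn : Int) y 0 0 bs
        = bs ++ (List.range m).map (fun k => ((y.drop (k * xn)).take xn).sum) := by
  intro m
  induction m with
  | zero =>
    intro y bs hlen
    have : y = [] := List.length_eq_zero_iff.mp (by omega)
    simp [this, countAltGo]
  | succ m ih =>
    intro y bs hlen
    have hxle : xn ≤ y.length := by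
      have : 1 * xn ≤ (m + 1) * xn := Nat.mul_le_mul_right xn (by omega)
      omega
    have hsplit : y = y.take xn ++ y.drop xn := (List.take_append_drop xn y).symm
    have hlen' : (y.take xn).length = xn := by rw [List.length_take]; omega
    have h0 : ((0 : Nat) : Int) = (0 : Int) := rfl
    calc countAltGo (xn : Int) y 0 0 bs
        = countAltGo (xn : Int) (y.take xn ++ y.drop xn) 0 ((0 : Nat) : Int) bs := by
          rw [← hsplit]; norm_num
      _ = countAltGo (xn : Int) (y.drop xn) 0 0 (bs ++ [0 + (y.take xn).sum]) := by
          exact countAltGo_bin xn hx (y.take xn) 0 0 (y.drop xn) bs (by simp [hlen']) hx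
      _ = bs ++ (List.range (m + 1)).map (fun k => ((y.drop (k * xn)).take xn).sum) := by
          rw [ih (y.drop xn) _ (by rw [List.length_drop, hlen, Nat.add_mul]; omega)]
          rw [List.range_succ_eq_map, List.append_assoc]
          congr 1
          simp only [List.map_cons, List.map_map, List.singleton_append, Nat.zero_mul,
            List.drop_zero, zero_add]
          congr 1
          apply List.map_congr_left
          intro k _
          simp only [Function.comp]
          rw [List.drop_drop, show xn + k * xn = k.succ * xn from by rw [Nat.succ_mul]; omega]
-- ===== VERDICT (by name: the statement is the Claim_ definition above) =====
theorem count_in_bin_spec : Claim_equal_count_in_bin := by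
  intro x y _ hpre
  obtain ⟨hx0, hmod⟩ := hpre
  unfold Spec_count_in_bin count_in_bin count_in_bin_alt
  have hdm := PySem.Int.floordiv_mul_add_mod (y.length : Int) x
  rw [hmod, add_zero] at hdm
  by_cases hxle : x ≤ 0
  · -- x < 0: bl ≤ 0, A's range is empty; B returns []
    have hxneg : x < 0 := lt_of_le_of_ne hxle hx0
    have hbl : PySem.Int.floordiv (y.length : Int) x ≤ 0 := by
      by_contra h
      push Not at h
      nlinarith [Int.natCast_nonneg y.length]
    simp [PySem.List.pyRange_one_eq_nil (by omega : (PySem.Int.floordiv (y.length : Int) x) ≤ 0), hxle]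
  · push Not at hxle
    obtain ⟨xn, rfl⟩ : ∃ xn : Nat, x = (xn : Int) := ⟨x.toNat, by omega⟩
    have hxn : 0 < xn := by exact_mod_cast hxle
    have hbl : PySem.Int.floordiv (y.length : Int) (xn : Int) = ((y.length / xn : Nat) : Int) :=
      PySem.Int.floordiv_natCast y.length xn
    set m := y.length / xn with hm
    have hylen : y.length = m * xn := by
      have hdvd : (xn : Int) ∣ (y.length : Int) :=
        ⟨PySem.Int.floordiv (y.length : Int) (xn : Int), by
          linarith [mul_comm (PySem.Int.floordiv (y.length : Int) (xn : Int)) ((xn : Int))]⟩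
      have hdn : xn ∣ y.length := by exact_mod_cast hdvd
      rw [hm]
      exact (Nat.div_mul_cancel hdn).symm
    rw [if_neg (by omega)]
    rw [countAltGo_chunks xn hxn m y [] hylen, List.nil_append]
    rw [foldl_append_map, List.nil_append, hbl, PySem.List.pyRange_one]
    simp only [zero_add, List.map_map]
    apply List.map_congr_left
    intro k _
    simpa using slice_chunk y xn k hxn
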